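-- pv_equiv track=rewrite | github.com/VictorMaxWang/AI_Hackathon_20260422 | app/tools/file_search.py | _validate_base_path
-- ===== SOURCE A (Python) =====
-- BLOCKED_SEARCH_ROOTS = ("/proc", "/sys", "/dev")
--
-- def _validate_base_path(base_path: str) -> str | None:
--     if not isinstance(base_path, str) or not base_path.strip():
--         return "base_path is required"
--
--     normalized = base_path.strip()
--     if normalized != "/":
--         normalized = normalized.rstrip("/")
--
--     if normalized == "/":
--         return "full filesystem search from / is refused; provide a narrower base_path"
--
--     for blocked_root in BLOCKED_SEARCH_ROOTS:
--         if normalized == blocked_root or normalized.startswith(f"{blocked_root}/"):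
--             return f"deep search under {blocked_root} is refused"
--
--     return None
-- ===== SOURCE B (Python) =====
-- BLOCKED_SEARCH_ROOTS = ("/proc", "/sys", "/dev")
-- _BLOCKED_SET = set(BLOCKED_SEARCH_ROOTS)
--
--
-- def _blocked_root_message(normalized):
--     parts = normalized.split("/")
--     if len(parts) >= 2 and parts[0] == "":
--         root = "/" + parts[1]
--         if root in _BLOCKED_SET:
--             return f"deep search under {root} is refused"
--     return None
--
--
-- def _validate_base_path(base_path):
--     if not isinstance(base_path, str) or not base_path.strip():
--         return "base_path is required"
--
--     normalized = base_path.strip()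
--     if normalized != "/":
--         normalized = normalized.rstrip("/")
--
--     if normalized == "/":
--         return "full filesystem search from / is refused; provide a narrower base_path"
--
--     return _blocked_root_message(normalized)
-- ===== Notes on version B (the rewrite author's own statement) =====
-- stated objective: idiomatic
-- what changed: replaces the scan over BLOCKED_SEARCH_ROOTS with a per-root equality-or-prefix test by a single parse of the normalized path: split it on the separator, extract the leading root component, and do one set-membership lookup
import Mathlib
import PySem

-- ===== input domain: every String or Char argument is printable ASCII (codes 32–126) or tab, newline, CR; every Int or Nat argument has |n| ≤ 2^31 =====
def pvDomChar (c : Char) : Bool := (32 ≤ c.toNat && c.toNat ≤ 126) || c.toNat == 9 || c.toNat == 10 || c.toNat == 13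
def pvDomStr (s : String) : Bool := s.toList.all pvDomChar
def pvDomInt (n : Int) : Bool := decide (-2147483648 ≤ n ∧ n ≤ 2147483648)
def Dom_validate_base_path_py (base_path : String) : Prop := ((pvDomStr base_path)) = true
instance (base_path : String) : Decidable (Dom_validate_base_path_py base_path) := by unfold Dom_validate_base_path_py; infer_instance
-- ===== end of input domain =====

-- B replaces A's per-root equality/prefix scan by one split on '/' plus a set lookup of the
-- leading root component (objective: idiomatic; same behaviour on every input).

-- hand port of Python's s.rstrip("/") (PySem has only the two-sided stripChars):
-- exact — removes exactly the trailing '/' characters.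
def pvRstripSlashes (s : String) : String :=
  String.ofList ((s.toList.reverse.dropWhile (fun c => c == '/')).reverse)

-- ===== PORT A =====
def pvBlockedLoop (normalized : String) : List String → Option String
  | [] => none
  | r :: rs =>
    if normalized = r ∨ PySem.Str.startswith normalized (r ++ "/") = true then
      some ("deep search under " ++ r ++ " is refused")
    else pvBlockedLoop normalized rs

def validate_base_path_py (base_path : String) : Option String :=
  if PySem.Str.strip base_path = "" then some "base_path is required"
  else
    let normalized0 := PySem.Str.strip base_path
    let normalized := if normalized0 ≠ "/" then pvRstripSlashes normalized0 else normalized0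
    if normalized = "/" then
      some "full filesystem search from / is refused; provide a narrower base_path"
    else pvBlockedLoop normalized ["/proc", "/sys", "/dev"]

-- ===== PORT B =====
-- port of Source B's _blocked_root_message: split on '/', take the leading '/<segment>' root,
-- one membership test against the blocked set
def pvBlockedRootMessage (normalized : String) : Option String :=
  match PySem.Str.split? normalized "/" with
  | none => none   -- unreachable: the separator "/" is nonempty
  | some parts =>
    if 2 ≤ parts.length ∧ PySem.List.pyGet? parts 0 = some "" then
      match PySem.List.pyGet? parts 1 with
      | none => none   -- unreachable under the length guard
      | some p1 =>
        let root := "/" ++ p1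
        if ["/proc", "/sys", "/dev"].contains root then
          some ("deep search under " ++ root ++ " is refused")
        else none
    else none

def validate_base_path_py_alt (base_path : String) : Option String :=
  if PySem.Str.strip base_path = "" then some "base_path is required"
  else
    let normalized0 := PySem.Str.strip base_path
    let normalized := if normalized0 ≠ "/" then pvRstripSlashes normalized0 else normalized0
    if normalized = "/" then
      some "full filesystem search from / is refused; provide a narrower base_path"
    else pvBlockedRootMessage normalized

-- ===== PRECONDITION & SPEC =====
def Spec_validate_base_path_py (base_path : String) (out : Option String) : Prop := out = validate_base_path_py_alt base_path
instance (base_path : String) (out : Option String) : Decidable (Spec_validate_base_path_py base_path out) := by unfold Spec_validate_base_path_py; infer_instance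

-- ===== CLAIM (what is proved, stated in full; the proofs are below) =====
def Claim_equal_validate_base_path_py : Prop := ∀ (base_path : String), Dom_validate_base_path_py base_path → Spec_validate_base_path_py base_path (validate_base_path_py base_path)

-- ===== LEMMAS AND PROOFS =====

-- simple structural recursion computing Python's split('/') on a char list
def pvSS : List Char → List (List Char)
  | [] => [[]]
  | c :: t => if c = '/' then [] :: pvSS t else (c :: (pvSS t).headI) :: (pvSS t).tail

theorem pvSS_ne_nil (cs : List Char) : pvSS cs ≠ [] := by
  cases cs with
  | nil => simp [pvSS]
  | cons c t => simp [pvSS]; split_ifs <;> simp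

theorem pvSS_headI (cs : List Char) : (pvSS cs).headI = cs.takeWhile (· ≠ '/') := by
  induction cs with
  | nil => simp [pvSS]
  | cons c t ih =>
    by_cases h : c = '/'
    · simp [pvSS, h, List.takeWhile]
    · simp [pvSS, h, List.takeWhile, ih]

theorem pvGo_eq (fuel : Nat) : ∀ (cs cur : List Char) (acc : List (List Char)),
    cs.length < fuel →
    PySem.Chars.splitOn.go ['/'] fuel cs cur acc
      = acc.reverse ++ (pvSS cs).modifyHead (cur.reverse ++ ·) := by
  induction fuel with
  | zero => intro cs cur acc h; omega
  | succ fuel ih =>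
    intro cs cur acc h
    cases cs with
    | nil => simp [PySem.Chars.splitOn.go, pvSS]
    | cons c t =>
      by_cases hc : c = '/'
      · subst hc
        rw [show PySem.Chars.splitOn.go ['/'] (fuel+1) ('/'::t) cur acc
              = PySem.Chars.splitOn.go ['/'] fuel (List.drop 1 ('/'::t)) [] (cur.reverse :: acc) by
            simp [PySem.Chars.splitOn.go]]
        rw [ih _ _ _ (by simpa using h)]
        simp [pvSS]
        rw [show (fun x => x) = @id (List Char) from rfl, List.modifyHead_id]
        simp
      · have hpre : (['/'] : List Char).isPrefixOf (c::t) = false := by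
          simp [List.isPrefixOf]
          exact fun h' => hc h'.symm
        rw [show PySem.Chars.splitOn.go ['/'] (fuel+1) (c::t) cur acc
              = PySem.Chars.splitOn.go ['/'] fuel t (c :: cur) acc by
            simp [PySem.Chars.splitOn.go, hpre]]
        rw [ih _ _ _ (by simpa using Nat.lt_of_succ_lt_succ h)]
        rcases hpt : pvSS t with _ | ⟨h0, r⟩
        · exact absurd hpt (pvSS_ne_nil t)
        · simp [pvSS, hc, hpt]

theorem pvSplitOn_slash (cs : List Char) : PySem.Chars.splitOn cs ['/'] = pvSS cs := by
  rw [PySem.Chars.splitOn, pvGo_eq (cs.length + 1) cs [] [] (Nat.lt_succ_self _)]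
  simp
  rw [show (fun x : List Char => x) = @id (List Char) from rfl, List.modifyHead_id]
  simp

theorem pvStrSplit_slash (n : String) :
    PySem.Str.split? n "/" = some ((pvSS n.toList).map String.ofList) := by
  have h := PySem.Str.split?_map n "/"
  rw [show ("/" : String).toList = ['/'] by decide] at h
  rw [show PySem.Chars.split? n.toList ['/'] = some (pvSS n.toList) by
    simp [PySem.Chars.split?, pvSplitOn_slash]] at h
  cases hs : PySem.Str.split? n "/" with
  | none => rw [hs] at h; simp at h
  | some L =>
    rw [hs] at h
    simp only [Option.map_some, Option.some.injEq] at h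
    congr 1
    rw [← h, List.map_map]
    simp [Function.comp_def]

theorem pvOfList_eq_iff (cs : List Char) (r : String) :
    String.ofList cs = r ↔ cs = r.toList := by
  constructor
  · intro h; have := congrArg String.toList h; simpa using this
  · intro h; subst h; simp

-- first-segment characterisation of A's per-root test, for a slash-free segment rs
theorem pvSegLemma (t : List Char) : ∀ rs : List Char, '/' ∉ rs →
    ((t = rs ∨ rs ++ ['/'] <+: t) ↔ t.takeWhile (· ≠ '/') = rs) := by
  induction t with
  | nil =>
    intro rs _
    constructor
    · rintro (h | h)
      · simp [← h]
      · rw [List.prefix_nil] at h; simp at h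
    · intro h; left; simpa using h.symm
  | cons c t ih =>
    intro rs hrs
    by_cases hc : c = '/'
    · subst hc
      have htw : List.takeWhile (fun x => decide (x ≠ '/')) ('/'::t) = [] := by
        rw [List.takeWhile_cons_of_neg]; simp
      cases rs with
      | nil =>
        simp only [htw]
        exact iff_of_true (Or.inr ⟨t, rfl⟩) trivial
      | cons r0 rs' =>
        have hr0 : r0 ≠ '/' := fun h' => hrs (h' ▸ List.mem_cons_self ..)
        simp only [htw]
        constructor
        · rintro (h | h)
          · simp only [List.cons.injEq] at h
            exact absurd h.1.symm hr0
          · have h1 := (List.cons_prefix_cons.mp (by simpa using h)).1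
            exact absurd h1 hr0
        · intro h; exact absurd h (by simp)
    · rw [List.takeWhile_cons_of_pos (by simpa using hc)]
      cases rs with
      | nil =>
        constructor
        · rintro (h | h)
          · simp at h
          · have h1 : '/' = c := by simp at h; exact h
            exact absurd h1.symm hc
        · intro h; simp at h
      | cons r0 rs' =>
        have hrs' : '/' ∉ rs' := fun h' => hrs (List.mem_cons_of_mem _ h')
        have hpfx : ((r0::rs') ++ ['/'] <+: c::t) ↔ (r0 = c ∧ rs' ++ ['/'] <+: t) := by
          simp only [List.cons_append]; exact List.cons_prefix_cons
        constructor
        · rintro (h | h)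
          · simp only [List.cons.injEq] at h ⊢
            exact ⟨h.1, (ih rs' hrs').mp (Or.inl h.2)⟩
          · obtain ⟨h1, h2⟩ := hpfx.mp h
            subst h1
            simp only [List.cons.injEq, true_and]
            exact (ih rs' hrs').mp (Or.inr h2)
        · intro h
          simp only [List.cons.injEq] at h
          obtain ⟨h1, h2⟩ := h
          subst h1
          rcases (ih rs' hrs').mpr h2 with h3 | h3
          · exact Or.inl (by rw [h3])
          · exact Or.inr (hpfx.mpr ⟨rfl, h3⟩)

theorem pvGet0 {α : Type} (a : α) (l : List α) : PySem.List.pyGet? (a :: l) 0 = some a := by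
  simp [PySem.List.pyGet?, PySem.List.pyIdx?]

theorem pvGet1 {α : Type} (a b : α) (l : List α) : PySem.List.pyGet? (a :: b :: l) 1 = some b := by
  simp [PySem.List.pyGet?, PySem.List.pyIdx?]

theorem pvSlashAppend (l : List Char) : "/" ++ String.ofList l = String.ofList ('/' :: l) := by
  apply String.toList_inj.mp
  simp [show ("/" : String).toList = ['/'] from rfl]

theorem pvCore (n : String) :
    pvBlockedLoop n ["/proc", "/sys", "/dev"] = pvBlockedRootMessage n := by
  obtain ⟨cs, rfl⟩ : ∃ cs, n = String.ofList cs := ⟨n.toList, by simp⟩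
  rw [pvBlockedRootMessage, pvStrSplit_slash]
  simp only [String.toList_ofList]
  simp only [pvBlockedLoop]
  cases cs with
  | nil =>
    simp [pvSS, PySem.Str.startswith_eq, PySem.Chars.startswith_iff,
      PySem.List.pyGet?]
  | cons c t =>
    by_cases hc : c = '/'
    · subst hc
      rcases hpt : pvSS t with _ | ⟨h0, r⟩
      · exact absurd hpt (pvSS_ne_nil t)
      have hh0 : h0 = t.takeWhile (· ≠ '/') := by
        have h' := pvSS_headI t; rw [hpt] at h'; exact h' 
      have hslash : ('/' : Char) ∉ ("proc".toList) ∧ ('/' : Char) ∉ ("sys".toList) ∧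
          ('/' : Char) ∉ ("dev".toList) := by decide
      have c1 : (String.ofList ('/'::t) = "/proc" ∨
          PySem.Str.startswith (String.ofList ('/'::t)) ("/proc" ++ "/") = true)
          ↔ h0 = "proc".toList := by
        rw [show ("/proc" : String) ++ "/" = "/proc/" from rfl]
        rw [pvOfList_eq_iff, PySem.Str.startswith_eq, PySem.Chars.startswith_iff]
        simp only [String.toList_ofList]
        rw [show ("/proc" : String).toList = '/' :: "proc".toList from rfl,
          show ("/proc/" : String).toList = ('/' :: ("proc".toList ++ ['/'])) from rfl,
          List.cons_prefix_cons]
        simp only [List.cons.injEq, true_and]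
        rw [hh0, ← pvSegLemma t _ hslash.1]
      have c2 : (String.ofList ('/'::t) = "/sys" ∨
          PySem.Str.startswith (String.ofList ('/'::t)) ("/sys" ++ "/") = true)
          ↔ h0 = "sys".toList := by
        rw [show ("/sys" : String) ++ "/" = "/sys/" from rfl]
        rw [pvOfList_eq_iff, PySem.Str.startswith_eq, PySem.Chars.startswith_iff]
        simp only [String.toList_ofList]
        rw [show ("/sys" : String).toList = '/' :: "sys".toList from rfl,
          show ("/sys/" : String).toList = ('/' :: ("sys".toList ++ ['/'])) from rfl,
          List.cons_prefix_cons]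
        simp only [List.cons.injEq, true_and]
        rw [hh0, ← pvSegLemma t _ hslash.2.1]
      have c3 : (String.ofList ('/'::t) = "/dev" ∨
          PySem.Str.startswith (String.ofList ('/'::t)) ("/dev" ++ "/") = true)
          ↔ h0 = "dev".toList := by
        rw [show ("/dev" : String) ++ "/" = "/dev/" from rfl]
        rw [pvOfList_eq_iff, PySem.Str.startswith_eq, PySem.Chars.startswith_iff]
        simp only [String.toList_ofList]
        rw [show ("/dev" : String).toList = '/' :: "dev".toList from rfl,
          show ("/dev/" : String).toList = ('/' :: ("dev".toList ++ ['/'])) from rfl,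
          List.cons_prefix_cons]
        simp only [List.cons.injEq, true_and]
        rw [hh0, ← pvSegLemma t _ hslash.2.2]
      -- reduce the B side
      have hparts : pvSS ('/'::t) = [] :: h0 :: r := by simp [pvSS, hpt]
      rw [hparts]
      simp only [List.map_cons, List.length_cons]
      rw [pvGet0, pvGet1]
      rw [if_pos (⟨by omega, by rfl⟩ :
        2 ≤ (r.map String.ofList).length + 1 + 1 ∧
          some (String.ofList ([] : List Char)) = some "")]
      show _ = if (["/proc", "/sys", "/dev"] : List String).contains
          ("/" ++ String.ofList h0) = true then
          some ("deep search under " ++ ("/" ++ String.ofList h0) ++ " is refused")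
        else none
      rw [pvSlashAppend]
      have e : ∀ rr : String, (String.ofList ('/'::h0) == rr) = decide ('/'::h0 = rr.toList) := by
        intro rr
        by_cases hxy : '/'::h0 = rr.toList
        · have hx : String.ofList ('/'::h0) = rr := (pvOfList_eq_iff _ _).mpr hxy
          simp [hxy]
        · have hx : String.ofList ('/'::h0) ≠ rr := fun hco => hxy ((pvOfList_eq_iff _ _).mp hco)
          simp [hx, hxy]
      have f : ∀ w : List Char, decide ('/'::h0 = '/'::w) = decide (h0 = w) :=
        fun w => decide_eq_decide.mpr (by simp)
      have hmem : (["/proc", "/sys", "/dev"] : List String).contains (String.ofList ('/'::h0))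
          = (decide (h0 = "proc".toList) || (decide (h0 = "sys".toList)
              || decide (h0 = "dev".toList))) := by
        simp only [List.contains_cons, List.contains_nil, Bool.or_false, e]
        rw [show ("/proc" : String).toList = '/' :: "proc".toList from rfl,
          show ("/sys" : String).toList = '/' :: "sys".toList from rfl,
          show ("/dev" : String).toList = '/' :: "dev".toList from rfl, f, f, f]
      rw [hmem]
      by_cases hp : h0 = "proc".toList
      · rw [if_pos (c1.mpr hp), if_pos (by simp [hp])]
        subst hp; rfl
      · by_cases hsy : h0 = "sys".toList
        · rw [if_neg (fun hx => hp (c1.mp hx)), if_pos (c2.mpr hsy),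
            if_pos (by simp [hsy])]
          subst hsy; rfl
        · by_cases hd : h0 = "dev".toList
          · rw [if_neg (fun hx => hp (c1.mp hx)), if_neg (fun hx => hsy (c2.mp hx)),
              if_pos (c3.mpr hd), if_pos (by simp [hd])]
            subst hd; rfl
          · rw [if_neg (fun hx => hp (c1.mp hx)), if_neg (fun hx => hsy (c2.mp hx)),
              if_neg (fun hx => hd (c3.mp hx)), if_neg (by
                rw [show ("proc" : String).toList = ['p','r','o','c'] from rfl] at hp
                rw [show ("sys" : String).toList = ['s','y','s'] from rfl] at hsy
                rw [show ("dev" : String).toList = ['d','e','v'] from rfl] at hd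
                simp [hp, hsy, hd])]
    · -- first character is not '/': no root matches, and parts[0] ≠ ""
      have hA : ∀ r : String, r.toList = '/' :: (r.toList.tail) →
          ¬ (String.ofList (c::t) = r ∨
            PySem.Str.startswith (String.ofList (c::t)) (r ++ "/") = true) := by
        intro r hr
        rintro (h | h)
        · rw [pvOfList_eq_iff, hr] at h
          exact hc (List.cons.injEq .. ▸ h).1
        · rw [PySem.Str.startswith_eq, PySem.Chars.startswith_iff] at h
          simp only [String.toList_ofList] at h
          rw [show (r ++ "/").toList = r.toList ++ ['/'] by simp] at h
          rw [hr] at h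
          exact hc (List.cons_prefix_cons.mp h).1.symm
      rw [if_neg (hA "/proc" rfl), if_neg (hA "/sys" rfl), if_neg (hA "/dev" rfl)]
      rcases hpt : pvSS t with _ | ⟨h0, r⟩
      · exact absurd hpt (pvSS_ne_nil t)
      have hparts : pvSS (c::t) = (c :: h0) :: r := by simp [pvSS, hc, hpt]
      rw [hparts]
      simp only [List.map_cons]
      rw [pvGet0]
      rw [if_neg]
      rintro ⟨-, hx⟩
      simp only [Option.some.injEq] at hx
      have := (pvOfList_eq_iff _ "").mp hx
      simp at this

theorem validate_base_path_py_spec : Claim_equal_validate_base_path_py := by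
  unfold Claim_equal_validate_base_path_py
  intro bp _
  unfold Spec_validate_base_path_py validate_base_path_py validate_base_path_py_alt
  simp only [pvCore]
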